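-- pv_equiv track=rewrite | github.com/AssassinQuin/hs_analysis | scripts/pool_quality_generator.py | build_pools
-- ===== SOURCE A (Python) =====
-- from collections import defaultdict
--
-- RACE_POOLS = ["DRAGON", "DEMON", "BEAST", "MURLOC", "PIRATE", "ELEMENTAL", "UNDEAD", "TOTEM", "MECHANICAL", "NAGA", "DRAENEI"]
--
-- SCHOOL_POOLS = ["FIRE", "FROST", "ARCANE", "NATURE", "SHADOW", "HOLY", "FEL"]
--
-- TYPE_POOLS = ["MINION", "SPELL", "WEAPON"]
--
-- def build_pools(cards):
--     """Build pool_name -> list of cards mappings."""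
--     pools = defaultdict(list)
--     for c in cards:
--         # Race pools
--         race = c.get("race", "") or ""
--         for r in RACE_POOLS:
--             if r in race:
--                 pools[f"race_{r}"].append(c)
--         # School pools (stored in 'race' field for spells)
--         for s in SCHOOL_POOLS:
--             if s in race:
--                 pools[f"school_{s}"].append(c)
--         # Type pools
--         t = c.get("type", "")
--         if t in TYPE_POOLS:
--             pools[f"type_{t}"].append(c)
--     return pools
-- ===== SOURCE B (Python) =====
-- from collections import defaultdict
--
-- RACE_POOLS = ["DRAGON", "DEMON", "BEAST", "MURLOC", "PIRATE", "ELEMENTAL", "UNDEAD", "TOTEM", "MECHANICAL", "NAGA", "DRAENEI"]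
--
-- SCHOOL_POOLS = ["FIRE", "FROST", "ARCANE", "NATURE", "SHADOW", "HOLY", "FEL"]
--
-- TYPE_POOLS = ["MINION", "SPELL", "WEAPON"]
--
--
-- def _pool_names(c):
--     """All pool names this one card belongs to, in A's per-card order."""
--     race = c.get("race", "") or ""
--     t = c.get("type", "")
--     return (["race_" + r for r in RACE_POOLS if r in race]
--             + ["school_" + s for s in SCHOOL_POOLS if s in race]
--             + (["type_" + t] if t in TYPE_POOLS else []))
--
--
-- def build_pools(cards):
--     """Build pool_name -> list of cards mappings (flatten, dedup keys, group by filter)."""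
--     pairs = [(name, c) for c in cards for name in _pool_names(c)]
--     pools = defaultdict(list)
--     for name in dict.fromkeys(n for n, _ in pairs):
--         pools[name] = [c for n, c in pairs if n == name]
--     return pools
-- ===== Notes on version B (the rewrite author's own statement) =====
-- stated objective: alternative
-- what changed: A makes one pass over cards appending each card into a defaultdict pool by pool; B flattens cards into a (pool_name, card) pair list, dedups the names in first-occurrence order, and builds each pool's list by filtering the pair list per key.
import Mathlib
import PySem

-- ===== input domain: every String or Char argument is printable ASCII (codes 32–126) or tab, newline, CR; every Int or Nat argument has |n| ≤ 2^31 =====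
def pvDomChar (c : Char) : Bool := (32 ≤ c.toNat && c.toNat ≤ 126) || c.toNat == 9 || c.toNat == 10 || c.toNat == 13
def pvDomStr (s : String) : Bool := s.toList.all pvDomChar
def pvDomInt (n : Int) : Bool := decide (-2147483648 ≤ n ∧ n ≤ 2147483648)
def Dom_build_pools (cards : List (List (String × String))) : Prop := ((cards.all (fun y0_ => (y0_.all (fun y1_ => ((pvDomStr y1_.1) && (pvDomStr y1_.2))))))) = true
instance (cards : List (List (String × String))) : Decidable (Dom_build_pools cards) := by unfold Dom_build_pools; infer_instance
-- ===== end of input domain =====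

-- B groups by flatten → ordered key-dedup → per-key filter instead of A's single pass of
-- per-card dictionary appends; objective: alternative decomposition, same results.

def RACE_POOLS : List String := ["DRAGON", "DEMON", "BEAST", "MURLOC", "PIRATE", "ELEMENTAL", "UNDEAD", "TOTEM", "MECHANICAL", "NAGA", "DRAENEI"]

def SCHOOL_POOLS : List String := ["FIRE", "FROST", "ARCANE", "NATURE", "SHADOW", "HOLY", "FEL"]

def TYPE_POOLS : List String := ["MINION", "SPELL", "WEAPON"]

-- ===== PORT A =====
-- one card's processing: race loop, school loop, then the type branch (A's body, in order)
def bpStepA (d : PySem.Dict String (List (List (String × String)))) (c : List (String × String)) :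
    PySem.Dict String (List (List (String × String))) :=
  let race := (PySem.Dict.mk c).getD "race" ""   -- race = c.get("race", "") or ""  ('or ""' is identity on str)
  let d := RACE_POOLS.foldl (fun d r =>
    if PySem.Str.isIn r race then d.modify ("race_" ++ r) [] (· ++ [c]) else d) d
  let d := SCHOOL_POOLS.foldl (fun d s =>
    if PySem.Str.isIn s race then d.modify ("school_" ++ s) [] (· ++ [c]) else d) d
  let t := (PySem.Dict.mk c).getD "type" ""
  if t ∈ TYPE_POOLS then d.modify ("type_" ++ t) [] (· ++ [c]) else d

def build_pools (cards : List (List (String × String))) : List (String × List (List (String × String))) :=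
  (cards.foldl bpStepA PySem.Dict.empty).items

-- ===== PORT B =====
-- all pool names of one card, in A's per-card order (Source B's _pool_names)
def bpNames (c : List (String × String)) : List String :=
  let race := (PySem.Dict.mk c).getD "race" ""
  let t := (PySem.Dict.mk c).getD "type" ""
  ((RACE_POOLS.filter (fun r => PySem.Str.isIn r race)).map (fun r => "race_" ++ r))
    ++ ((SCHOOL_POOLS.filter (fun s => PySem.Str.isIn s race)).map (fun s => "school_" ++ s))
    ++ (if t ∈ TYPE_POOLS then ["type_" ++ t] else [])

def build_pools_alt (cards : List (List (String × String))) : List (String × List (List (String × String))) :=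
  let pairs := cards.flatMap (fun c => (bpNames c).map (fun n => (n, c)))
  (PySem.List.dedup (pairs.map Prod.fst)).map
    (fun n => (n, (pairs.filter (fun p => p.1 == n)).map Prod.snd))

-- ===== PRECONDITION & SPEC =====
def Spec_build_pools (cards : List (List (String × String))) (out : List (String × List (List (String × String)))) : Prop := out = build_pools_alt cards
instance (cards : List (List (String × String))) (out : List (String × List (List (String × String)))) : Decidable (Spec_build_pools cards out) := by unfold Spec_build_pools; infer_instance

-- ===== CLAIM (what is proved, stated in full; the proofs are below) =====
def Claim_equal_build_pools : Prop := ∀ (cards : List (List (String × String))), Dom_build_pools cards → Spec_build_pools cards (build_pools cards)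

-- ===== LEMMAS AND PROOFS =====

-- a filtered-guard loop is the fold over the filtered, mapped list
theorem foldl_if_filter_map {α β γ : Type} (p : α → Bool) (f : α → β)
    (g : γ → β → γ) (l : List α) (d : γ) :
    l.foldl (fun d x => if p x then g d (f x) else d) d
      = ((l.filter p).map f).foldl g d := by
  induction l generalizing d with
  | nil => rfl
  | cons x xs ih =>
    by_cases h : p x = true <;> simp [h, ih]

-- A's per-card body is the fold of appends over bpNames c
theorem bpStepA_eq_names_fold (d : PySem.Dict String (List (List (String × String))))
    (c : List (String × String)) :
    bpStepA d c = (bpNames c).foldl (fun d n => d.modify n [] (· ++ [c])) d := by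
  unfold bpStepA bpNames
  dsimp only
  rw [foldl_if_filter_map (fun r => PySem.Str.isIn r ((PySem.Dict.mk c).getD "race" ""))
        (fun r => "race_" ++ r) (fun d n => d.modify n [] (· ++ [c])) RACE_POOLS d,
      foldl_if_filter_map (fun s => PySem.Str.isIn s ((PySem.Dict.mk c).getD "race" ""))
        (fun s => "school_" ++ s)
        (fun (d : PySem.Dict String (List (List (String × String)))) n =>
          d.modify n [] (· ++ [c])) SCHOOL_POOLS]
  simp only [List.foldl_append]
  by_cases h : (PySem.Dict.mk c).getD "type" "" ∈ TYPE_POOLS <;> simp [h]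

-- the whole pass is one fold over the flattened (name, card) pairs
theorem build_pools_eq_pairs_fold (cards : List (List (String × String))) :
    cards.foldl bpStepA PySem.Dict.empty
      = (cards.flatMap (fun c => (bpNames c).map (fun n => (n, c)))).foldl
          (fun d p => d.modify p.1 [] (· ++ [p.2])) PySem.Dict.empty := by
  suffices h : ∀ (d : PySem.Dict String (List (List (String × String)))),
      cards.foldl bpStepA d
        = (cards.flatMap (fun c => (bpNames c).map (fun n => (n, c)))).foldl
            (fun d p => d.modify p.1 [] (· ++ [p.2])) d from h _
  induction cards with
  | nil => intro d; rfl
  | cons c cs ih =>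
    intro d
    simp only [List.foldl_cons, List.flatMap_cons, List.foldl_append, ih,
      bpStepA_eq_names_fold, List.foldl_map]

theorem build_pools_spec : Claim_equal_build_pools := by
  intro cards _
  show build_pools cards = build_pools_alt cards
  unfold build_pools build_pools_alt
  rw [build_pools_eq_pairs_fold]
  set pairs := cards.flatMap (fun c => (bpNames c).map (fun n => (n, c))) with hpairs
  have hnd : ((pairs.foldl (fun d p => d.modify p.1 [] (· ++ [p.2])) PySem.Dict.empty).keys).Nodup := by
    exact PySem.Dict.nodup_keys_foldl_modify_key pairs Prod.fst [] (fun d p => (· ++ [p.2])) _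
      PySem.Dict.nodup_keys_empty
  rw [PySem.Dict.items_eq_map_keys _ hnd []]
  rw [PySem.Dict.keys_foldl_modify_key]
  simp only [PySem.Dict.keys_empty, PySem.Set.update_nil_left, PySem.List.dedup_eq_ofList]
  refine List.map_congr_left (fun n _ => ?_)
  rw [PySem.Dict.getD_foldl_modify_append]
  simp [PySem.Dict.getD_empty]
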